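-- pv_equiv track=rewrite | github.com/phillipbess/SecondLegAdvancedMESStrategy | src/scripts/trade_narrative.py | slice_run_segment
-- ===== SOURCE A (Python) =====
-- from typing import Dict, Iterable, List, Optional, Tuple
--
-- ACTIVE_MARKERS = (
--     "[ENTRY_SUBMIT]",
--     "[ENTRY_FILL]",
--     "[STOP_ACK]",
--     "[STOP_CHANGE]",
--     "[TRADE_CLOSE]",
--     "[EXIT_FILL]",
-- )
--
-- def segment_is_active(segment: Iterable[str]) -> bool:
--     return any(marker in line for line in segment for marker in ACTIVE_MARKERS)
--
-- def slice_run_segment(lines: List[str], run_segment: str) -> List[str]: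
--     if not lines or run_segment == "AllDay":
--         return lines
--
--     run_starts = [i for i, line in enumerate(lines) if "=== NEW RUN ===" in line]
--     if not run_starts:
--         return lines
--
--     chosen_start = run_starts[-1]
--     if run_segment == "LastActive":
--         for idx in range(len(run_starts) - 1, -1, -1):
--             start = run_starts[idx]
--             end = run_starts[idx + 1] if idx < len(run_starts) - 1 else len(lines)
--             if segment_is_active(lines[start:end]):
--                 chosen_start = start
--                 break
--
--     chosen_end = len(lines)
--     for idx in range(len(run_starts) - 1):
--         if run_starts[idx] == chosen_start:
--             chosen_end = run_starts[idx + 1]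
--             break
--     return lines[chosen_start:chosen_end]
-- ===== SOURCE B (Python) =====
-- ACTIVE_MARKERS = (
--     "[ENTRY_SUBMIT]",
--     "[ENTRY_FILL]",
--     "[STOP_ACK]",
--     "[STOP_CHANGE]",
--     "[TRADE_CLOSE]",
--     "[EXIT_FILL]",
-- )
--
-- def slice_run_segment(lines, run_segment):
--     if not lines or run_segment == "AllDay":
--         return lines
--     # single forward pass: track the current (last-seen) run and the latest
--     # already-closed active run; no segment table, no reverse scan, no index math
--     cur_start = None      # start of the run currently open
--     cur_active = False    # does the open run contain an active marker?
--     best = None           # (start, end) of the latest CLOSED run that was active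
--     for i, line in enumerate(lines):
--         if "=== NEW RUN ===" in line:
--             if cur_start is not None and cur_active:
--                 best = (cur_start, i)
--             cur_start = i
--             cur_active = any(m in line for m in ACTIVE_MARKERS)
--         elif cur_start is not None and not cur_active:
--             cur_active = any(m in line for m in ACTIVE_MARKERS)
--     if cur_start is None:
--         return lines
--     if run_segment == "LastActive":
--         if cur_active:
--             return lines[cur_start:]
--         if best is not None:
--             return lines[best[0]:best[1]]
--     return lines[cur_start:]
-- ===== Notes on version B (the rewrite author's own statement) =====
-- stated objective: alternative
-- what changed: B replaces A's staged passes (collect run_starts, reverse-scan segments for activity, then a second scan to find chosen_end) with one forward pass over the lines that carries an accumulator (current run start, whether it is active, latest closed active run), so no index table, slicing-per-candidate or reverse scan is ever built.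
import Mathlib
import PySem

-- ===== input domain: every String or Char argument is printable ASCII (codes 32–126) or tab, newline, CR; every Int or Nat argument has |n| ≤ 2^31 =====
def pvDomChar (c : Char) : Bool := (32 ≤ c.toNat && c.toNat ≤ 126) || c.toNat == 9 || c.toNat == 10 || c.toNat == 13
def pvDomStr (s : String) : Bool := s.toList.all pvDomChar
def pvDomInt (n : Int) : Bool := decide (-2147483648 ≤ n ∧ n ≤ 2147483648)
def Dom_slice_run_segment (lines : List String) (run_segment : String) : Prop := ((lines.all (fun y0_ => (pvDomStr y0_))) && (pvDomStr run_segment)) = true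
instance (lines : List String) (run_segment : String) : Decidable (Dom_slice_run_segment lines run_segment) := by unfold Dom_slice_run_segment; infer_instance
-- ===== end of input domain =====

-- B replaces A's staged passes (run_starts list, reverse scan for an active segment,
-- second scan for chosen_end) with ONE forward pass carrying an accumulator
-- (current run start, its activity flag, latest closed active run) — objective: alternative.

-- ===== PORT A =====
-- module constant, shared verbatim by both Pythons
def ACTIVE_MARKERS : List String :=
  ["[ENTRY_SUBMIT]", "[ENTRY_FILL]", "[STOP_ACK]", "[STOP_CHANGE]", "[TRADE_CLOSE]", "[EXIT_FILL]"]

-- A's helper segment_is_active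
def segment_is_active (segment : List String) : Bool :=
  segment.any (fun line => ACTIVE_MARKERS.any (fun marker => PySem.Str.isIn marker line))

-- A's run_starts comprehension
def runStarts (lines : List String) : List Int :=
  (PySem.List.enumerate lines 0).filterMap
    (fun p => if PySem.Str.isIn "=== NEW RUN ===" p.2 then some p.1 else none)

-- A's 'for idx in range(len(run_starts)-1, -1, -1): … break' loop; fuel k means idx = k-1 … 0
def aScan (lines : List String) (rs : List Int) : Nat → Option Int
  | 0 => none
  | (k+1) =>
    let start := PySem.List.pyGetD rs (k : Int) 0
    let stop := if (k : Int) < (rs.length : Int) - 1 then PySem.List.pyGetD rs ((k : Int) + 1) 0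
                else (lines.length : Int)
    if segment_is_active (PySem.List.slice lines (some start) (some stop)) then some start
    else aScan lines rs k

-- A's 'for idx in range(len(run_starts)-1): if run_starts[idx] == chosen_start: … break' loop
def aFindEnd (cs : Int) (n : Int) : List Int → Int
  | a :: b :: rest => if a = cs then b else aFindEnd cs n (b :: rest)
  | _ => n

def slice_run_segment (lines : List String) (run_segment : String) : List String :=
  if lines = [] ∨ run_segment = "AllDay" then lines
  else
    let rs := runStarts lines
    if rs = [] then lines
    else
      let chosen_start :=
        if run_segment = "LastActive" then
          match aScan lines rs rs.length with
          | some s => s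
          | none => PySem.List.pyGetD rs (-1) 0
        else PySem.List.pyGetD rs (-1) 0
      let chosen_end := aFindEnd chosen_start (lines.length : Int) rs
      PySem.List.slice lines (some chosen_start) (some chosen_end)

-- ===== PORT B =====
-- Source B's inline 'any(m in line for m in ACTIVE_MARKERS)'
def lineActive (line : String) : Bool :=
  ACTIVE_MARKERS.any (fun m => PySem.Str.isIn m line)

-- one iteration of Source B's 'for i, line in enumerate(lines)' body over the state
-- (cur_start, cur_active, best)
def bStep (st : Option Int × Bool × Option (Int × Int)) (p : Int × String) :
    Option Int × Bool × Option (Int × Int) :=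
  if PySem.Str.isIn "=== NEW RUN ===" p.2 then
    (some p.1, lineActive p.2,
      match st.1, st.2.1 with
      | some s, true => some (s, p.1)
      | _, _ => st.2.2)
  else if st.1.isSome && !st.2.1 then (st.1, lineActive p.2, st.2.2)
  else st

def slice_run_segment_alt (lines : List String) (run_segment : String) : List String :=
  if lines = [] ∨ run_segment = "AllDay" then lines
  else
    match (PySem.List.enumerate lines 0).foldl bStep (none, false, none) with
    | (none, _, _) => lines
    | (some cs, ca, best) =>
      if run_segment = "LastActive" then
        if ca then PySem.List.slice lines (some cs) none
        else
          match best with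
          | some (s, e) => PySem.List.slice lines (some s) (some e)
          | none => PySem.List.slice lines (some cs) none
      else PySem.List.slice lines (some cs) none

-- ===== PRECONDITION & SPEC =====
def Spec_slice_run_segment (lines : List String) (run_segment : String) (out : List String) : Prop := out = slice_run_segment_alt lines run_segment
instance (lines : List String) (run_segment : String) (out : List String) : Decidable (Spec_slice_run_segment lines run_segment out) := by unfold Spec_slice_run_segment; infer_instance

-- ===== CLAIM (what is proved, stated in full; the proofs are below) =====
def Claim_equal_slice_run_segment : Prop := ∀ (lines : List String) (run_segment : String), Dom_slice_run_segment lines run_segment → Spec_slice_run_segment lines run_segment (slice_run_segment lines run_segment)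

-- ===== LEMMAS AND PROOFS =====

theorem runStarts_mem (lines : List String) (s : Int) (hs : s ∈ runStarts lines) :
    ∃ k : Nat, s = (k : Int) ∧ k < lines.length := by
  unfold runStarts at hs
  obtain ⟨p, hp, hps⟩ := List.mem_filterMap.mp hs
  obtain ⟨k, hk, rfl⟩ := (PySem.List.mem_enumerate_iff _ _ _).mp hp
  split at hps
  · refine ⟨k, ?_, hk⟩
    have := Option.some.inj hps
    omega
  · simp at hps

theorem runStarts_pairwise (lines : List String) : (runStarts lines).Pairwise (· < ·) := by
  unfold runStarts
  rw [List.pairwise_filterMap]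
  refine (PySem.List.pairwise_lt_enumerate lines 0).imp_of_mem ?_
  intro a b _ _ hab x hx y hy
  split at hx <;> simp_all

theorem runStarts_append (xs : List String) (x : String) :
    runStarts (xs ++ [x]) =
      runStarts xs ++
        (if PySem.Str.isIn "=== NEW RUN ===" x then [((xs.length : Int))] else []) := by
  unfold runStarts
  rw [PySem.List.enumerate_append, List.filterMap_append]
  congr 1
  have he : PySem.List.enumerate [x] (0 + (xs.length : Int)) = [((xs.length : Int), x)] := by
    simp [PySem.List.enumerate]
  rw [he]
  cases hm : PySem.Str.isIn "=== NEW RUN ===" x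
  · try simp [PySem.Str.isIn] at hm
    simp [hm]
  · try simp [PySem.Str.isIn] at hm
    simp [hm]

theorem seg_active_append (seg : List String) (x : String) :
    segment_is_active (seg ++ [x]) = (segment_is_active seg || lineActive x) := by
  simp [segment_is_active, lineActive, List.any_append]

theorem slice_from_append (xs : List String) (x : String) (k : Nat) (hk : k ≤ xs.length) :
    PySem.List.slice (xs ++ [x]) (some (k : Int)) none =
      PySem.List.slice xs (some (k : Int)) none ++ [x] := by
  rw [PySem.List.slice_from_natCast, PySem.List.slice_from_natCast,
    List.drop_append_of_le_length hk]

theorem slice_frozen_append (xs : List String) (x : String) (a b : Nat) (hb : b ≤ xs.length) :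
    PySem.List.slice (xs ++ [x]) (some (a : Int)) (some (b : Int)) =
      PySem.List.slice xs (some (a : Int)) (some (b : Int)) := by
  rw [PySem.List.slice_natCast, PySem.List.slice_natCast]
  by_cases ha : a ≤ xs.length
  · rw [List.drop_append_of_le_length ha]
    rw [List.take_append_of_le_length (by simp; omega)]
  · rw [List.drop_eq_nil_of_le (show (xs ++ [x]).length ≤ a by simp; omega),
      List.drop_eq_nil_of_le (show xs.length ≤ a by omega)]

theorem zip_drop1_append (rs : List Int) (n : Int) (h : rs ≠ []) :
    rs.zip (rs.drop 1 ++ [n]) = rs.zip (rs.drop 1) ++ [(rs.getLast h, n)] := by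
  induction rs with
  | nil => simp at h
  | cons a t ih =>
    match t with
    | [] => simp [List.zip]
    | b :: t' =>
      have hih := ih (by simp)
      simp only [List.drop_succ_cons, List.drop_zero] at hih ⊢
      simp only [List.zip_cons_cons, List.cons_append]
      rw [hih]
      simp [List.getLast_cons]

theorem zip_self_append (rs : List Int) (n : Int) :
    (rs ++ [n]).zip ((rs ++ [n]).drop 1) =
      rs.zip (rs.drop 1) ++
        (if h : rs ≠ [] then [(rs.getLast h, n)] else []) := by
  by_cases h : rs = []
  · subst h; simp
  · rw [dif_pos h]
    have hd : (rs ++ [n]).drop 1 = rs.drop 1 ++ [n] := by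
      rw [List.drop_append_of_le_length (by have := List.length_pos_of_ne_nil h; omega)]
    have htrunc : (rs ++ [n]).zip (rs.drop 1 ++ [n]) = rs.zip (rs.drop 1 ++ [n]) := by
      rw [show rs.drop 1 ++ [n] = (rs.drop 1 ++ [n]) ++ ([] : List Int) by simp,
        List.zip_append (by simp; have := List.length_pos_of_ne_nil h; omega)]
      simp
    rw [hd, htrunc, zip_drop1_append rs n h]

theorem find?_congr_mem {α : Type} (l : List α) (p q : α → Bool)
    (h : ∀ a ∈ l, p a = q a) : l.find? p = l.find? q := by
  induction l with
  | nil => rfl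
  | cons a t ih =>
    simp only [List.find?_cons]
    rw [h a (by simp)]
    cases q a
    · exact ih (fun b hb => h b (by simp [hb]))
    · rfl

theorem seg_active_singleton (x : String) : segment_is_active [x] = lineActive x := by
  simp [segment_is_active, lineActive]

-- the forward-pass invariant: after folding over all of `l`, the state is the last
-- run start, whether the final segment is active, and the latest closed active pair
theorem fold_inv (l : List String) :
    (PySem.List.enumerate l 0).foldl bStep (none, false, none) =
      ((runStarts l).getLast?,
       (match (runStarts l).getLast? with
        | none => false
        | some s => segment_is_active (PySem.List.slice l (some s) none)),
       ((runStarts l).zip ((runStarts l).drop 1)).reverse.find?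
         (fun p => segment_is_active (PySem.List.slice l (some p.1) (some p.2)))) := by
  induction l using List.reverseRecOn with
  | nil => simp [runStarts, PySem.List.enumerate]
  | append_singleton xs x ih =>
    rw [PySem.List.enumerate_append, List.foldl_append, ih]
    have henum : PySem.List.enumerate [x] (0 + (xs.length : Int)) = [((xs.length : Int), x)] := by
      simp [PySem.List.enumerate]
    rw [henum, List.foldl_cons, List.foldl_nil]
    have hrsapp := runStarts_append xs x
    have hfrozen : ∀ p ∈ (((runStarts xs).zip ((runStarts xs).drop 1)).reverse),
        segment_is_active (PySem.List.slice (xs ++ [x]) (some p.1) (some p.2))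
          = segment_is_active (PySem.List.slice xs (some p.1) (some p.2)) := by
      intro p hp
      obtain ⟨hp1, hp2⟩ := List.of_mem_zip (List.mem_reverse.mp hp)
      obtain ⟨a, ha, halt⟩ := runStarts_mem xs p.1 hp1
      obtain ⟨b, hb, hblt⟩ := runStarts_mem xs p.2 (List.mem_of_mem_drop hp2)
      rw [ha, hb, slice_frozen_append xs x a b (le_of_lt hblt)]
    have hrest := find?_congr_mem (((runStarts xs).zip ((runStarts xs).drop 1)).reverse)
      (fun p => segment_is_active (PySem.List.slice (xs ++ [x]) (some p.1) (some p.2)))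
      (fun p => segment_is_active (PySem.List.slice xs (some p.1) (some p.2))) hfrozen
    by_cases hm : PySem.Str.isIn "=== NEW RUN ===" x
    · -- x starts a new run
      rw [hrsapp, if_pos hm]
      unfold bStep
      dsimp only
      rw [if_pos hm]
      rw [List.getLast?_concat, zip_self_append]
      have hnewself : PySem.List.slice (xs ++ [x]) (some ((xs.length : Int))) none = [x] := by
        rw [PySem.List.slice_from_natCast, List.drop_append_of_le_length (le_refl _),
          List.drop_length]
        rfl
      by_cases h0 : runStarts xs = []
      · rw [dif_neg (fun hh => hh h0)]
        simp [h0, hnewself, seg_active_singleton]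
      · rw [dif_pos h0]
        have hlast : (runStarts xs).getLast? = some ((runStarts xs).getLast h0) :=
          List.getLast?_eq_getLast h0
        obtain ⟨kl, hkl, hkllt⟩ := runStarts_mem xs ((runStarts xs).getLast h0) (List.getLast_mem h0)
        have hnewslice : PySem.List.slice (xs ++ [x]) (some ((runStarts xs).getLast h0))
            (some ((xs.length : Int))) = PySem.List.slice xs (some ((runStarts xs).getLast h0)) none := by
          rw [hkl, PySem.List.slice_natCast, PySem.List.slice_from_natCast,
            List.drop_append_of_le_length (le_of_lt hkllt),
            List.take_append_of_le_length (by simp),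
            List.take_of_length_le (by simp)]
        rw [hlast, List.reverse_append, List.reverse_singleton, List.singleton_append]
        dsimp only
        simp only [List.find?_cons]
        cases hca : segment_is_active (PySem.List.slice xs (some ((runStarts xs).getLast h0)) none) with
        | true => simp [hnewslice, hnewself, seg_active_singleton, hca]
        | false =>
          simp [hnewslice, hnewself, seg_active_singleton, hca]
          rw [← List.drop_one]
          exact hrest.symm
    · -- x does not start a run: run list and pairs unchanged
      rw [hrsapp, if_neg hm, List.append_nil]
      unfold bStep
      dsimp only
      rw [if_neg hm, hrest]
      by_cases h0 : runStarts xs = []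
      · simp [h0]
      · have hlast : (runStarts xs).getLast? = some ((runStarts xs).getLast h0) :=
          List.getLast?_eq_getLast h0
        obtain ⟨kl, hkl, hkllt⟩ := runStarts_mem xs ((runStarts xs).getLast h0) (List.getLast_mem h0)
        have hslice : PySem.List.slice (xs ++ [x]) (some ((runStarts xs).getLast h0)) none =
            PySem.List.slice xs (some ((runStarts xs).getLast h0)) none ++ [x] := by
          rw [hkl]; exact slice_from_append xs x kl (le_of_lt hkllt)
        rw [hlast]
        dsimp only
        rw [hslice, seg_active_append]
        by_cases hca : segment_is_active (PySem.List.slice xs (some ((runStarts xs).getLast h0)) none) = true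
        · simp [hca]
        · rw [Bool.not_eq_true] at hca
          simp [hca]

theorem seg_table_getElem (rs : List Int) (n : Int) (k : Nat) (hk : k < rs.length) :
    (rs.zip (rs.drop 1 ++ [n]))[k]'(by
      simp [List.length_zip]
      omega) =
    (rs[k], if h : k + 1 < rs.length then rs[k+1]'h else n) := by
  have hlen : (rs.drop 1 ++ [n]).length = rs.length := by
    simp; omega
  rw [List.getElem_zip]
  congr 1
  by_cases h : k + 1 < rs.length
  · rw [List.getElem_append_left (by simp; omega)]
    simp only [List.getElem_drop]
    rw [dif_pos h]
    congr 1
    omega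
  · rw [List.getElem_append_right (by simp; omega)]
    simp [h]

theorem seg_table_length (rs : List Int) (n : Int) (h : rs ≠ []) :
    (rs.zip (rs.drop 1 ++ [n])).length = rs.length := by
  have : rs.length ≠ 0 := by simpa using (List.length_pos_of_ne_nil h).ne'
  simp [List.length_zip]
  omega

theorem aFindEnd_at (rs : List Int) (n : Int) (hp : rs.Pairwise (· < ·)) (k : Nat) (hk : k < rs.length) :
    aFindEnd (rs[k]) n rs = if h : k + 1 < rs.length then rs[k+1]'h else n := by
  induction rs generalizing k with
  | nil => simp at hk
  | cons a rest ih =>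
    match rest, k with
    | [], 0 => simp [aFindEnd]
    | [], k+1 => simp at hk
    | b :: rest', 0 => simp [aFindEnd]
    | b :: rest', k+1 =>
      have hkk : k < (b :: rest').length := by simp at hk ⊢; omega
      have hmem : (b :: rest')[k]'hkk ∈ b :: rest' := List.getElem_mem _
      have hne : a ≠ (b :: rest')[k]'hkk := by
        have := (List.pairwise_cons.mp hp).1 _ hmem
        omega
      simp only [aFindEnd, List.getElem_cons_succ]
      rw [if_neg hne]
      have := ih (List.pairwise_cons.mp hp).2 k hkk
      simp only [this]
      simp only [List.length_cons]
      by_cases h2 : k + 1 < rest'.length + 1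
      · rw [dif_pos h2, dif_pos (by omega)]
        simp
      · rw [dif_neg h2, dif_neg (by omega)]

theorem aScan_eq_find (lines : List String) (rs : List Int) (k : Nat) (hk : k ≤ rs.length) :
    aScan lines rs k =
      (((rs.zip (rs.drop 1 ++ [(lines.length : Int)])).take k).reverse.find?
        (fun p => segment_is_active (PySem.List.slice lines (some p.1) (some p.2)))).map (·.1) := by
  induction k with
  | zero => simp [aScan]
  | succ k ih =>
    have hk' : k < rs.length := by omega
    have hlen := seg_table_length rs (lines.length : Int) (by intro h; subst h; simp at hk')
    have hkz : k < (rs.zip (rs.drop 1 ++ [(lines.length : Int)])).length := by omega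
    rw [List.take_add_one, List.getElem?_eq_getElem hkz]
    simp only [Option.toList, List.reverse_append, List.reverse_cons, List.reverse_nil,
      List.nil_append, List.cons_append]
    rw [seg_table_getElem rs (lines.length : Int) k hk']
    simp only [aScan]
    have hstart : PySem.List.pyGetD rs (k : Int) 0 = rs[k] := by
      rw [PySem.List.pyGetD_natCast]
      exact List.getD_eq_getElem rs 0 hk'
    by_cases hlt : k + 1 < rs.length
    · have hcast : ((k : Int) < (rs.length : Int) - 1) = True := by simp; omega
      have hstop : PySem.List.pyGetD rs ((k : Int) + 1) 0 = rs[k+1]'hlt := by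
        have : ((k : Int) + 1) = ((k + 1 : Nat) : Int) := by push_cast; ring
        rw [this, PySem.List.pyGetD_natCast]
        exact List.getD_eq_getElem rs 0 hlt
      simp only [hcast, if_true, hstart, hstop, dif_pos hlt]
      by_cases hact : segment_is_active (PySem.List.slice lines (some rs[k]) (some (rs[k+1]'hlt))) = true
      · rw [if_pos hact, List.find?_cons_of_pos (by simpa using hact)]
        rfl
      · rw [if_neg hact, List.find?_cons_of_neg (by simpa using hact)]
        exact ih (by omega)
    · have hcast : ((k : Int) < (rs.length : Int) - 1) = False := by simp; omega
      simp only [hcast, if_false, hstart, dif_neg hlt]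
      by_cases hact : segment_is_active (PySem.List.slice lines (some rs[k]) (some (lines.length : Int))) = true
      · rw [if_pos hact, List.find?_cons_of_pos (by simpa using hact)]
        rfl
      · rw [if_neg hact, List.find?_cons_of_neg (by simpa using hact)]
        exact ih (by omega)

theorem find_mem_snd (lines : List String) (rs : List Int) (p : Int × Int)
    (hp : rs.Pairwise (· < ·))
    (hmem : p ∈ rs.zip (rs.drop 1 ++ [(lines.length : Int)])) :
    aFindEnd p.1 (lines.length : Int) rs = p.2 := by
  obtain ⟨k, hk, hkeq⟩ := List.mem_iff_getElem.mp hmem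
  have hk' : k < rs.length := by
    have := seg_table_length rs (lines.length : Int) (by
      intro hc; subst hc; simp at hmem)
    omega
  rw [seg_table_getElem rs (lines.length : Int) k hk'] at hkeq
  have h1 : p.1 = rs[k] := by rw [← hkeq]
  have h2 : p.2 = if h : k + 1 < rs.length then rs[k+1]'h else (lines.length : Int) := by
    rw [← hkeq]
  rw [h1, h2, aFindEnd_at rs (lines.length : Int) hp k hk']

-- ===== VERDICT (by name: the statement is the Claim_ definition above) =====
theorem slice_run_segment_spec : Claim_equal_slice_run_segment := by
  intro lines run_segment _
  unfold Spec_slice_run_segment slice_run_segment slice_run_segment_alt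
  by_cases hg : lines = [] ∨ run_segment = "AllDay"
  · simp [hg]
  · rw [if_neg hg, if_neg hg, fold_inv]
    by_cases hr : runStarts lines = []
    · simp [hr]
    · rw [if_neg hr]
      have hp := runStarts_pairwise lines
      have hpos : 0 < (runStarts lines).length := List.length_pos_of_ne_nil hr
      have hlast : (runStarts lines).getLast? = some ((runStarts lines).getLast hr) :=
        List.getLast?_eq_getLast hr
      obtain ⟨kl, hkl, hkllt⟩ :=
        runStarts_mem lines ((runStarts lines).getLast hr) (List.getLast_mem hr)
      have hgetlast : PySem.List.pyGetD (runStarts lines) (-1) 0 = (runStarts lines).getLast hr :=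
        PySem.List.pyGetD_neg_one _ _ hr
      have hlast_end : aFindEnd ((runStarts lines).getLast hr) (lines.length : Int)
          (runStarts lines) = (lines.length : Int) := by
        have h := aFindEnd_at (runStarts lines) (lines.length : Int) hp
          ((runStarts lines).length - 1) (by omega)
        rw [dif_neg (by omega)] at h
        rwa [List.getLast_eq_getElem]
      have hlastslice : PySem.List.slice lines (some ((runStarts lines).getLast hr))
          (some ((lines.length : Int))) =
          PySem.List.slice lines (some ((runStarts lines).getLast hr)) none := by
        rw [hkl, PySem.List.slice_natCast, PySem.List.slice_from_natCast,
          List.take_of_length_le (by simp)]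
      rw [hlast]
      dsimp only
      by_cases hla : run_segment = "LastActive"
      · rw [if_pos hla, if_pos hla]
        have hscan := aScan_eq_find lines (runStarts lines) (runStarts lines).length (le_refl _)
        rw [List.take_of_length_le (seg_table_length _ _ hr).le,
          zip_drop1_append _ ((lines.length : Int)) hr, List.reverse_append,
          List.reverse_singleton, List.singleton_append, List.find?_cons] at hscan
        simp only [hlastslice] at hscan
        cases hca : segment_is_active
            (PySem.List.slice lines (some ((runStarts lines).getLast hr)) none) with
        | true =>
          simp only [hca, Option.map_some] at hscan
          rw [hscan]
          dsimp only
          rw [hlast_end, hlastslice]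
          simp
        | false =>
          simp only [hca] at hscan
          simp only [Bool.false_eq_true, if_false]
          cases hfind : List.find?
              (fun p => segment_is_active (PySem.List.slice lines (some p.1) (some p.2)))
              ((runStarts lines).zip (List.drop 1 (runStarts lines))).reverse with
          | none =>
            rw [hfind] at hscan
            simp only [Option.map_none] at hscan
            rw [hscan]
            dsimp only
            rw [hgetlast, hlast_end, hlastslice]
          | some q =>
            obtain ⟨q1, q2⟩ := q
            rw [hfind] at hscan
            simp only [Option.map_some] at hscan
            rw [hscan]
            dsimp only
            have hmem : (q1, q2) ∈ (runStarts lines).zip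
                (List.drop 1 (runStarts lines) ++ [(lines.length : Int)]) := by
              rw [zip_drop1_append _ ((lines.length : Int)) hr]
              exact List.mem_append_left _
                (List.mem_reverse.mp (List.mem_of_find?_eq_some hfind))
            have hend := find_mem_snd lines (runStarts lines) (q1, q2) hp hmem
            rw [hend]
      · rw [if_neg hla, if_neg hla]
        rw [hgetlast, hlast_end, hlastslice]
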